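-- pv_equiv track=rewrite | github.com/ElleNajt/TinyProjects | Testing_Broder_Wilson_Combination.py | loop_erasure
-- ===== SOURCE A (Python) =====
-- def loop_erasure(trip):
--     '''erases loops from a trip
--
--     :trip: input of node names...
--     '''
--     n = len(trip)
--     loop_erased_walk_indices = []
--     last_occurance = n - trip[::-1].index(trip[0]) - 1
--     loop_erased_walk_indices.append(last_occurance)
--     branch_length = 0
--     while trip[loop_erased_walk_indices[-1]] != trip[-1]:
--         last_occurance = n -  trip[::-1].index(trip[loop_erased_walk_indices[-1]])  -1
--         loop_erased_walk_indices.append(last_occurance + 1)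
--         branch_length += 1
--     loop_erased_trip = [trip[i] for i in loop_erased_walk_indices]
--
--     return (loop_erased_trip, branch_length + 1)
-- ===== SOURCE B (Python) =====
-- def loop_erasure(trip):
--     '''erases loops from a trip
--
--     :trip: input of node names...
--     '''
--     erased = []
--     for v in trip:
--         if v in erased:
--             del erased[erased.index(v) + 1:]
--         else:
--             erased.append(v)
--     return (erased, len(erased))
-- ===== Notes on version B (the rewrite author's own statement) =====
-- stated objective: simpler
-- what changed: B erases loops chronologically in one forward pass with a stack (truncate the stack when a node reappears, else push), instead of A's backward walk that repeatedly rescans the reversed trip for last occurrences and jumps to last-exit indices; the two constructions provably yield the same loop-erased trip.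
import Mathlib
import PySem

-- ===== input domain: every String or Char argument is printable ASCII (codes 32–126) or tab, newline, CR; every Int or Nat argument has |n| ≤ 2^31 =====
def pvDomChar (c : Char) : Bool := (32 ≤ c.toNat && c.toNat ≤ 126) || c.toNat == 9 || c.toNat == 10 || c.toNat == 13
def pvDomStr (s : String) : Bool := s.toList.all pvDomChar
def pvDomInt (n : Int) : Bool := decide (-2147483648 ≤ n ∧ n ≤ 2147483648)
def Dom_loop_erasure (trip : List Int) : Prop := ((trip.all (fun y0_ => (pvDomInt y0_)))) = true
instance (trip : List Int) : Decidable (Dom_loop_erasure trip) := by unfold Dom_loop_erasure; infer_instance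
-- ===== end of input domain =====

-- B erases loops chronologically in a single forward pass with a stack, instead of A's
-- last-exit jump walk (per-step reversal + .index rescan); objective: simpler; return
-- values are proved equal on nonempty trips.

-- ===== PORT A =====
-- the while loop of A; fuel bounds the recursion (the loop's index strictly increases, so
-- trip.length + 1 steps are never exhausted on inputs satisfying Pre_)
def loopErasureAGo (trip : List Int) : Nat → List Int → Int → List Int × Int
  | 0, idxs, br => (idxs.map (fun i => (PySem.List.pyGet? trip i).getD 0), br + 1)
  | fuel+1, idxs, br =>
    -- while trip[loop_erased_walk_indices[-1]] != trip[-1]: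
    let cur := (PySem.List.pyGet? idxs (-1)).getD 0
    if PySem.List.pyGet? trip cur ≠ PySem.List.pyGet? trip (-1) then
      -- last_occurance = n - trip[::-1].index(trip[loop_erased_walk_indices[-1]]) - 1
      let k : Int := ((PySem.List.index? ((PySem.List.slice? trip none none (-1)).getD [])
                        ((PySem.List.pyGet? trip cur).getD 0)).getD 0 : Nat)
      loopErasureAGo trip fuel (idxs ++ [((PySem.List.len trip) - k - 1) + 1]) (br + 1)
    else (idxs.map (fun i => (PySem.List.pyGet? trip i).getD 0), br + 1)

def loop_erasure (trip : List Int) : List Int × Int :=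
  let n : Int := PySem.List.len trip
  match PySem.List.pyGet? trip 0 with
  | none => ([], 0)  -- trip[0] raises IndexError: outside Pre_
  | some t0 =>
    let k : Int := ((PySem.List.index? ((PySem.List.slice? trip none none (-1)).getD []) t0).getD 0 : Nat)
    loopErasureAGo trip (trip.length + 1) [n - k - 1] 0

-- ===== PORT B =====
-- the body of B's for-loop: if v in erased: del erased[erased.index(v)+1:] else: erased.append(v)
def bstep (erased : List Int) (v : Int) : List Int :=
  if erased.contains v then
    -- .index never raises here: it is guarded by the membership test
    erased.take (((PySem.List.index? erased v).getD 0) + 1)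
  else
    erased ++ [v]

def loop_erasure_alt (trip : List Int) : List Int × Int :=
  let erased := trip.foldl bstep []
  (erased, PySem.List.len erased)

-- ===== PRECONDITION & SPEC =====
-- Pre_ excludes only the empty list, on which the Python A raises IndexError reading the first element.
def Pre_loop_erasure (trip : List Int) : Prop := trip ≠ []
instance (trip : List Int) : Decidable (Pre_loop_erasure trip) := by
  unfold Pre_loop_erasure; infer_instance

def pvWitness_loop_erasure : List Int := [1, 2, 1, 3]

def Spec_loop_erasure (trip : List Int) (out : List Int × Int) : Prop := out = loop_erasure_alt trip
instance (trip : List Int) (out : List Int × Int) : Decidable (Spec_loop_erasure trip out) := by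
  unfold Spec_loop_erasure; infer_instance

-- ===== CLAIM (what is proved, stated in full; the proofs are below) =====
def Claim_equal_loop_erasure : Prop :=
  ∀ (trip : List Int), Dom_loop_erasure trip → Pre_loop_erasure trip →
    Spec_loop_erasure trip (loop_erasure trip)

-- ===== LEMMAS AND PROOFS =====

-- the index of the LAST occurrence of v in trip (A computes it as n - trip[::-1].index(v) - 1)
def lastIdx (trip : List Int) (v : Int) : Nat :=
  trip.length - 1 - ((PySem.List.index? trip.reverse v).getD 0)

theorem lastIdx_spec (trip : List Int) (v : Int) (hv : v ∈ trip) :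
    PySem.List.index? trip.reverse v = some (trip.length - 1 - lastIdx trip v) ∧
    lastIdx trip v < trip.length ∧
    trip[lastIdx trip v]? = some v ∧
    v ∉ trip.drop (lastIdx trip v + 1) := by
  have hvr : v ∈ trip.reverse := List.mem_reverse.mpr hv
  obtain ⟨r, hr⟩ := Option.isSome_iff_exists.mp ((PySem.List.index?_isSome_iff _ _).mpr hvr)
  obtain ⟨hrlt, hget, hmin⟩ := PySem.List.getElem_of_index?_eq_some hr
  have hlen : trip.reverse.length = trip.length := List.length_reverse
  have hrlt' : r < trip.length := hlen ▸ hrlt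
  have hm : lastIdx trip v = trip.length - 1 - r := by
    unfold lastIdx
    rw [hr]
    rfl
  have hgetm : trip[trip.length - 1 - r]'(by omega) = v := by
    have := List.getElem_reverse (l := trip) (i := r) (h := hrlt)
    rw [this] at hget
    convert hget using 2
  refine ⟨?_, ?_, ?_, ?_⟩
  · rw [hr, hm]; congr 1; omega
  · omega
  · rw [hm, List.getElem?_eq_getElem (by omega)]; exact congrArg some hgetm
  · rw [hm]
    intro hmem
    obtain ⟨j, hj, hjv⟩ := List.mem_iff_getElem.mp hmem
    rw [List.getElem_drop] at hjv
    -- trip[(len-1-r+1) + j] = v; its reverse index is < r, contradicting minimality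
    have hidx : trip.length - 1 - r + 1 + j < trip.length := by
      have := hj
      simp [List.length_drop] at this
      omega
    have : trip.reverse[trip.length - 1 - (trip.length - 1 - r + 1 + j)]'(by rw [hlen]; omega) = v := by
      rw [List.getElem_reverse]
      convert hjv using 2
      omega
    exact hmin _ (by omega) this

theorem lastIdx_ge (trip : List Int) (v : Int) (i : Nat) (h : trip[i]? = some v) :
    i ≤ lastIdx trip v := by
  have hv : v ∈ trip := List.mem_of_getElem? h
  obtain ⟨-, hlt, -, hnd⟩ := lastIdx_spec trip v hv
  by_contra hlt'
  apply hnd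
  have hi : i < trip.length := (List.getElem?_eq_some_iff.mp h).1
  rw [List.mem_iff_getElem]
  refine ⟨i - (lastIdx trip v + 1), by simp [List.length_drop]; omega, ?_⟩
  rw [List.getElem_drop]
  have : lastIdx trip v + 1 + (i - (lastIdx trip v + 1)) = i := by omega
  rw [List.getElem?_eq_getElem hi] at h
  simp only [this]
  exact Option.some.inj h

theorem lastIdx_drop (trip : List Int) (d : Nat) (v : Int) (hv : v ∈ trip.drop d) :
    lastIdx trip v = d + lastIdx (trip.drop d) v := by
  have hd : d < trip.length := by
    by_contra h
    rw [List.drop_eq_nil_of_le (by omega)] at hv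
    exact absurd hv (List.not_mem_nil)
  obtain ⟨hidxS, hltS, -, -⟩ := lastIdx_spec (trip.drop d) v hv
  have hvt : v ∈ trip := List.mem_of_mem_drop hv
  obtain ⟨hidxT, hltT, hgetT, hndT⟩ := lastIdx_spec trip v hvt
  have hsplit : trip.reverse = (trip.drop d).reverse ++ (trip.take d).reverse := by
    rw [← List.reverse_append, List.take_append_drop]
  have : PySem.List.index? trip.reverse v = some (trip.length - d - 1 - lastIdx (trip.drop d) v) := by
    rw [hsplit, PySem.List.index?_append_of_mem _ (List.mem_reverse.mpr hv), hidxS]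
    congr 1
    simp [List.length_drop]
  rw [hidxT] at this
  have := Option.some.inj this
  simp [List.length_drop] at hltS
  omega

-- the common specification: Lawler's last-exit walk of values, from index i;
-- both the A-side jump loop and the B-side stack fold are proved equal to it
def Vf (trip : List Int) : Nat → Nat → List Int
  | 0, _ => []
  | fuel+1, i =>
    match trip[i]? with
    | none => []
    | some v =>
      if trip.getLast? = some v then [v]
      else v :: Vf trip fuel (lastIdx trip v + 1)

theorem Vf_fuel_congr (trip : List Int) :
    ∀ (f1 f2 i : Nat), trip.length ≤ f1 + i → trip.length ≤ f2 + i →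
      Vf trip f1 i = Vf trip f2 i := by
  intro f1
  induction f1 with
  | zero =>
    intro f2 i h1 h2
    have : trip[i]? = none := List.getElem?_eq_none (by omega)
    cases f2 with
    | zero => rfl
    | succ f2 => simp [Vf, this]
  | succ f1 ih =>
    intro f2 i h1 h2
    cases f2 with
    | zero =>
      have : trip[i]? = none := List.getElem?_eq_none (by omega)
      simp [Vf, this]
    | succ f2 =>
      simp only [Vf]
      cases hg : trip[i]? with
      | none => rfl
      | some v =>
        have hge : i ≤ lastIdx trip v := lastIdx_ge trip v i hg
        by_cases hl : trip.getLast? = some v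
        · simp [hl]
        · simp only [hl, reduceIte]
          congr 1
          exact ih f2 (lastIdx trip v + 1) (by omega) (by omega)

theorem Vf_shift (trip : List Int) (d : Nat) (hne : trip.drop d ≠ []) :
    ∀ (f i : Nat), Vf trip f (d + i) = Vf (trip.drop d) f i := by
  intro f
  induction f with
  | zero => intro i; rfl
  | succ f ih =>
    intro i
    have hget : trip[d + i]? = (trip.drop d)[i]? := List.getElem?_drop.symm
    have hlast : trip.getLast? = (trip.drop d).getLast? := by
      conv_lhs => rw [← List.take_append_drop d trip]
      exact List.getLast?_append_of_ne_nil _ hne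
    simp only [Vf, hget, hlast]
    cases hg : (trip.drop d)[i]? with
    | none => rfl
    | some v =>
      by_cases hl : (trip.drop d).getLast? = some v
      · simp [hl]
      · have hv : v ∈ trip.drop d := List.mem_of_getElem? hg
        simp only [hl, reduceIte]
        congr 1
        rw [lastIdx_drop trip d v hv]
        have : d + lastIdx (trip.drop d) v + 1 = d + (lastIdx (trip.drop d) v + 1) := by omega
        rw [this, ih]

theorem Vf_head (trip : List Int) (f i : Nat) (v : Int) (h : trip[i]? = some v) :
    ∃ t, Vf trip (f+1) i = v :: t := by
  simp only [Vf, h]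
  by_cases hl : trip.getLast? = some v
  · rw [if_pos hl]; exact ⟨[], rfl⟩
  · rw [if_neg hl]; exact ⟨_, rfl⟩

theorem bstep_nil (v : Int) : bstep [] v = [v] := by
  simp [bstep]

theorem bstep_self (x : Int) (s : List Int) : bstep (x :: s) x = [x] := by
  unfold bstep
  rw [PySem.List.index?_cons_self]
  simp

theorem bstep_ne (x v : Int) (s : List Int) (h : v ≠ x) :
    bstep (x :: s) v = x :: bstep s v := by
  unfold bstep
  rw [PySem.List.index?_cons_of_ne _ (fun he => h he.symm)]
  by_cases hm : v ∈ s
  · obtain ⟨k, hk⟩ := Option.isSome_iff_exists.mp ((PySem.List.index?_isSome_iff _ _).mpr hm)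
    have hk' : List.idxOf? v s = some k := by rw [← PySem.List.index?_eq_idxOf?]; exact hk
    simp [hm, h, hk', List.take_succ_cons]
  · simp [hm, h]

theorem foldl_bstep_head (x : Int) :
    ∀ (zs s : List Int), ∃ t, List.foldl bstep (x :: s) zs = x :: t := by
  intro zs
  induction zs with
  | nil => exact fun s => ⟨s, rfl⟩
  | cons v vs ih =>
    intro s
    by_cases h : v = x
    · subst h
      rw [List.foldl_cons, bstep_self]
      exact ih []
    · rw [List.foldl_cons, bstep_ne x v s h]
      exact ih (bstep s v)

theorem foldl_bstep_notmem (x : Int) :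
    ∀ (zs s : List Int), x ∉ zs → List.foldl bstep (x :: s) zs = x :: List.foldl bstep s zs := by
  intro zs
  induction zs with
  | nil => intro s _; rfl
  | cons v vs ih =>
    intro s hx
    have hvx : v ≠ x := fun h => hx (by simp [h])
    rw [List.foldl_cons, List.foldl_cons, bstep_ne x v s hvx, ih _ (fun h => hx (by simp [h]))]

theorem foldl_eq_Vf (n : Nat) :
    ∀ (trip : List Int), trip.length ≤ n → trip ≠ [] →
      trip.foldl bstep [] = Vf trip (trip.length + 1) 0 := by
  induction n with
  | zero =>
    intro trip hlen hne
    exact absurd (List.length_pos_iff.mpr hne) (by omega)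
  | succ n ih =>
    intro trip hlen hne
    obtain ⟨x, rest, rfl⟩ := List.exists_cons_of_ne_nil hne
    have hx : (x :: rest)[0]? = some x := rfl
    have hv : x ∈ x :: rest := List.mem_cons_self
    obtain ⟨hidx, hjlt, hjget, hnd⟩ := lastIdx_spec (x :: rest) x hv
    set trip := x :: rest with htrip
    set j := lastIdx trip x with hj
    -- processing the prefix up to (and including) the last occurrence of x collapses to [x]
    have htake : List.foldl bstep [] (trip.take (j+1)) = [x] := by
      match hjq : j, hjget with
      | 0, _ =>
        simp [htrip, List.take_succ_cons, bstep_nil]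
      | (k+1), hjget' =>
        have hrget : rest[k]? = some x := by simpa [htrip] using hjget'
        have hkr : k < rest.length := (List.getElem?_eq_some_iff.mp hrget).1
        have : trip.take (k+2) = x :: (rest.take k ++ [x]) := by
          rw [htrip, List.take_succ_cons, List.take_add_one, hrget]
          rfl
        rw [this, List.foldl_cons, bstep_nil, List.foldl_append]
        obtain ⟨t, ht⟩ := foldl_bstep_head x (rest.take k) []
        rw [ht, List.foldl_cons, bstep_self, List.foldl_nil]
    have hsplitf : trip.foldl bstep [] = List.foldl bstep [x] (trip.drop (j+1)) := by
      conv_lhs => rw [← List.take_append_drop (j+1) trip, List.foldl_append, htake]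
    cases hsuf : trip.drop (j+1) with
    | nil =>
      have hjlen : j = trip.length - 1 := by
        have := List.drop_eq_nil_iff.mp hsuf
        omega
      have hlast : trip.getLast? = some x := by
        rw [List.getLast?_eq_getElem?, ← hjlen]
        exact hjget
      rw [hsplitf, hsuf]
      simp only [List.foldl_nil]
      simp only [Vf, hx, hlast, if_pos]
    | cons s0 srest =>
      have hsne : trip.drop (j+1) ≠ [] := by rw [hsuf]; simp
      have hxs : x ∉ trip.drop (j+1) := hnd
      have hlens : (trip.drop (j+1)).length = trip.length - (j+1) := List.length_drop
      have hglast : trip.getLast? = (trip.drop (j+1)).getLast? := by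
        conv_lhs => rw [← List.take_append_drop (j+1) trip]
        exact List.getLast?_append_of_ne_nil _ hsne
      have hgne : trip.getLast? ≠ some x := by
        rw [hglast]
        intro h
        exact hxs (List.mem_of_getElem? (by rw [← List.getLast?_eq_getElem?]; exact h))
      have hstep : trip.foldl bstep [] = x :: List.foldl bstep [] (trip.drop (j+1)) := by
        rw [hsplitf, foldl_bstep_notmem x _ [] hxs]
      have hlenpos : 0 < trip.length := List.length_pos_iff.mpr hne
      have hih := ih (trip.drop (j+1)) (by omega) hsne
      have hVun : Vf trip (trip.length + 1) 0 = x :: Vf trip trip.length (j + 1) := by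
        simp only [Vf, hx, hgne, reduceIte, ← hj]
      have hshift : Vf trip trip.length (j + 1) = Vf (trip.drop (j+1)) trip.length 0 := by
        have := Vf_shift trip (j+1) hsne trip.length 0
        simpa using this
      have hfc : Vf (trip.drop (j+1)) trip.length 0
          = Vf (trip.drop (j+1)) ((trip.drop (j+1)).length + 1) 0 :=
        Vf_fuel_congr _ _ _ _ (by omega) (by omega)
      rw [hstep, hih, hVun, hshift, hfc]

theorem loopAGo_eq (trip : List Int) :
    ∀ (fuel : Nat) (idxs : List Int) (i : Nat) (br : Int),
      idxs.getLast? = some (i : Int) → i < trip.length → trip.length ≤ fuel + i →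
      loopErasureAGo trip fuel idxs br =
        (idxs.map (fun j => (PySem.List.pyGet? trip j).getD 0) ++ (Vf trip (trip.length+1) i).tail,
         br + ((Vf trip (trip.length+1) i).length : Int)) := by
  intro fuel
  induction fuel with
  | zero =>
    intro idxs i br _ hi hfuel
    exact absurd hi (by omega)
  | succ fuel ih =>
    intro idxs i br hlast hi hfuel
    have hne : trip ≠ [] := List.ne_nil_of_length_pos (by omega)
    have hgi : PySem.List.pyGet? trip (i : Int) = some (trip[i]'hi) := by
      rw [PySem.List.pyGet?_natCast, List.getElem?_eq_getElem hi]
    have higet : trip[i]? = some (trip[i]'hi) := List.getElem?_eq_getElem hi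
    simp only [loopErasureAGo, PySem.List.pyGet?_neg_one, hlast, Option.getD_some, hgi]
    by_cases hc : trip.getLast? = some (trip[i]'hi)
    · rw [if_neg (by rw [hc]; simp)]
      have hVf : Vf trip (trip.length + 1) i = [trip[i]'hi] := by
        simp only [Vf, higet, hc, if_pos]
      rw [hVf]
      simp
    · rw [if_pos (fun h => hc h.symm)]
      have hvmem : (trip[i]'hi) ∈ trip := List.getElem_mem hi
      obtain ⟨hidx, hmlt, hmget, hmnd⟩ := lastIdx_spec trip (trip[i]'hi) hvmem
      have hmi : i ≤ lastIdx trip (trip[i]'hi) := lastIdx_ge trip _ i higet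
      have hmne : lastIdx trip (trip[i]'hi) ≠ trip.length - 1 := by
        intro h
        have hgl2 : trip.getLast? = trip[lastIdx trip (trip[i]'hi)]? := by
          rw [List.getLast?_eq_getElem?, h]
        exact hc (by rw [hgl2, hmget])
      have hm1 : lastIdx trip (trip[i]'hi) + 1 < trip.length := by omega
      have hrev : (PySem.List.slice? trip none none (-1)).getD [] = trip.reverse := by
        rw [PySem.List.slice?_none_none_neg_one]; rfl
      rw [hrev, hidx]
      have hcast : ((trip.length - 1 - lastIdx trip (trip[i]'hi) : Nat) : Int)
          = (trip.length : Int) - 1 - (lastIdx trip (trip[i]'hi) : Int) := by omega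
      have harith : PySem.List.len trip - ((trip.length - 1 - lastIdx trip (trip[i]'hi) : Nat) : Int) - 1 + 1
          = ((lastIdx trip (trip[i]'hi) + 1 : Nat) : Int) := by
        rw [PySem.List.len_eq, hcast]; push_cast; ring
      rw [Option.getD_some, harith]
      have hget1 : trip[lastIdx trip (trip[i]'hi) + 1]? = some (trip[lastIdx trip (trip[i]'hi) + 1]'hm1) :=
        List.getElem?_eq_getElem hm1
      rw [ih (idxs ++ [((lastIdx trip (trip[i]'hi) + 1 : Nat) : Int)]) (lastIdx trip (trip[i]'hi) + 1) (br + 1)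
        (by rw [List.getLast?_concat]) hm1 (by omega)]
      have hfc : Vf trip trip.length (lastIdx trip (trip[i]'hi) + 1)
          = Vf trip (trip.length + 1) (lastIdx trip (trip[i]'hi) + 1) :=
        Vf_fuel_congr _ _ _ _ (by omega) (by omega)
      have hVi : Vf trip (trip.length + 1) i
          = (trip[i]'hi) :: Vf trip trip.length (lastIdx trip (trip[i]'hi) + 1) := by
        conv_lhs => rw [Vf]
        simp only [higet, hc, reduceIte]
      obtain ⟨t, ht⟩ := Vf_head trip trip.length (lastIdx trip (trip[i]'hi) + 1) _ hget1
      have hfc2 : PySem.List.pyGet? trip ((lastIdx trip (trip[i]'hi) + 1 : Nat) : Int)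
          = some (trip[lastIdx trip (trip[i]'hi) + 1]'hm1) := by
        rw [PySem.List.pyGet?_natCast, hget1]
      refine Prod.ext ?_ ?_
      · simp only [hVi, List.tail_cons, hfc, ht, List.map_append, List.map_cons, List.map_nil,
          hfc2, Option.getD_some, List.append_assoc, List.singleton_append]
      · simp only [hVi, List.length_cons, hfc]
        push_cast
        ring

theorem final_eq (trip : List Int) (hpre : trip ≠ []) :
    loop_erasure trip = loop_erasure_alt trip := by
  have hlen : 0 < trip.length := List.length_pos_iff.mpr hpre
  have h0 : PySem.List.pyGet? trip 0 = some (trip[0]'hlen) := by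
    rw [PySem.List.pyGet?_zero, List.getElem?_eq_getElem hlen]
  have h0' : trip[0]? = some (trip[0]'hlen) := List.getElem?_eq_getElem hlen
  have hvmem : (trip[0]'hlen) ∈ trip := List.getElem_mem hlen
  obtain ⟨hidx, hjlt, hjget, hnd⟩ := lastIdx_spec trip (trip[0]'hlen) hvmem
  have hrev : (PySem.List.slice? trip none none (-1)).getD [] = trip.reverse := by
    rw [PySem.List.slice?_none_none_neg_one]; rfl
  unfold loop_erasure loop_erasure_alt
  rw [h0]
  simp only [hrev, hidx, Option.getD_some]
  have harith : PySem.List.len trip - ((trip.length - 1 - lastIdx trip (trip[0]'hlen) : Nat) : Int) - (1 : Int)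
      = ((lastIdx trip (trip[0]'hlen) : Nat) : Int) := by
    rw [PySem.List.len_eq]
    omega
  rw [harith,
    loopAGo_eq trip (trip.length + 1) [((lastIdx trip (trip[0]'hlen) : Nat) : Int)]
      (lastIdx trip (trip[0]'hlen)) 0 (by simp) hjlt (by omega)]
  have hV0 : Vf trip (trip.length + 1) (lastIdx trip (trip[0]'hlen)) = Vf trip (trip.length + 1) 0 := by
    conv_lhs => rw [Vf]
    conv_rhs => rw [Vf]
    simp only [hjget, h0']
  rw [foldl_eq_Vf trip.length trip le_rfl hpre, ← hV0]
  obtain ⟨t, ht⟩ := Vf_head trip trip.length (lastIdx trip (trip[0]'hlen)) _ hjget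
  have hfj : PySem.List.pyGet? trip ((lastIdx trip (trip[0]'hlen) : Nat) : Int)
      = some (trip[0]'hlen) := by
    rw [PySem.List.pyGet?_natCast, hjget]
  refine Prod.ext ?_ ?_
  · simp only [List.map_cons, List.map_nil, hfj, Option.getD_some, ht, List.tail_cons,
      List.singleton_append]
  · simp only [PySem.List.len_eq, zero_add]

-- ===== VERDICT (by name: the statement is the Claim_ definition above) =====
theorem loop_erasure_spec : Claim_equal_loop_erasure := by
  intro trip _ hpre
  exact final_eq trip hpre
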